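-- pv_equiv track=rewrite | github.com/Diald/C-PP | #vid 42 Recursion 4.py | countPath
-- ===== SOURCE A (Python) =====
-- def countPath(s,e):
--     if(s==e):
--         return 1
--     if(s>e):
--         return 0
--     count = 0
--     for i in range(1,6):
--         count+=countPath(s+i,e)
--     return count
-- ===== SOURCE B (Python) =====
-- def countPath(s, e):
--     if s > e:
--         return 0
--     w = (1, 0, 0, 0, 0)
--     for _ in range(e - s):
--         w = (w[0] + w[1] + w[2] + w[3] + w[4], w[0], w[1], w[2], w[3])
--     return w[0]
-- ===== Notes on version B (the rewrite author's own statement) =====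
-- stated objective: alternative
-- what changed: Replaced the 5-way recursive enumeration with an iterative rolling-window dynamic program over the distance e-s that keeps only the last five path counts.
import Mathlib
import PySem

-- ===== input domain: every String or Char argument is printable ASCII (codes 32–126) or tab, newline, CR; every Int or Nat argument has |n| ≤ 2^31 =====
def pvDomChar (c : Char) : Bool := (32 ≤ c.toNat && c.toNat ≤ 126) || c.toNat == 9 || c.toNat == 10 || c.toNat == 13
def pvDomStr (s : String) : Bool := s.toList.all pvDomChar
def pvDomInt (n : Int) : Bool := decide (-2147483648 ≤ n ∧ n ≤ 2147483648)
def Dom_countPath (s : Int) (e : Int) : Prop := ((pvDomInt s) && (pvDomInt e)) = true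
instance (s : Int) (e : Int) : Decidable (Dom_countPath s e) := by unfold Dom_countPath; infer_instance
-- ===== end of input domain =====

-- B replaces A's 5-way recursive enumeration by an iterative rolling-window DP over the distance e-s.

-- ===== PORT A =====
-- A's recursion, made total with a fuel counter; fuel (e-s).toNat+1 always suffices (the recursion strictly shrinks e-s)
def countPathGo : Nat → Int → Int → Int
  | 0, _, _ => 0
  | fuel + 1, s, e =>
    if s = e then 1
    else if s > e then 0
    else ([1, 2, 3, 4, 5] : List Int).foldl (fun count i => count + countPathGo fuel (s + i) e) 0

def countPath (s : Int) (e : Int) : Int := countPathGo ((e - s).toNat + 1) s e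

-- ===== PORT B =====
-- the rolling window (w[0],…,w[4]) after n iterations of B's loop
def pvStep : Nat → Int × Int × Int × Int × Int
  | 0 => (1, 0, 0, 0, 0)
  | n + 1 =>
    ((pvStep n).1 + (pvStep n).2.1 + (pvStep n).2.2.1 + (pvStep n).2.2.2.1 + (pvStep n).2.2.2.2,
     (pvStep n).1, (pvStep n).2.1, (pvStep n).2.2.1, (pvStep n).2.2.2.1)

def countPath_alt (s : Int) (e : Int) : Int :=
  if s > e then 0
  else (pvStep (e - s).toNat).1

-- ===== PRECONDITION & SPEC =====
-- Pre_ excludes inputs with e - s >= 900: there A's recursion reaches depth e - s and raises RecursionError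
-- (CPython's default limit is 1000; 900 leaves headroom for the caller's stack), so A returns no value.
def Pre_countPath (s : Int) (e : Int) : Prop := e - s < 900
instance (s : Int) (e : Int) : Decidable (Pre_countPath s e) := by unfold Pre_countPath; infer_instance
def pvWitness_countPath : Int × Int := (0, 5)

def Spec_countPath (s : Int) (e : Int) (out : Int) : Prop := out = countPath_alt s e
instance (s : Int) (e : Int) (out : Int) : Decidable (Spec_countPath s e out) := by unfold Spec_countPath; infer_instance

-- ===== CLAIM (what is proved, stated in full; the proofs are below) =====
def Claim_equal_countPath : Prop := ∀ (s : Int) (e : Int), Dom_countPath s e → Pre_countPath s e → Spec_countPath s e (countPath s e)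

-- ===== LEMMAS AND PROOFS =====

-- W n = number of step-1..5 paths over distance n; g n k = W (n-k), or 0 when k > n
def W (n : Nat) : Int := (pvStep n).1
def g (n k : Nat) : Int := if k ≤ n then W (n - k) else 0

theorem g_succ (n k : Nat) : g (n + 1) (k + 1) = g n k := by
  unfold g
  by_cases h : k ≤ n
  · rw [if_pos (by omega), if_pos h]
    congr 1
    omega
  · rw [if_neg (by omega), if_neg h]

theorem g_one (n : Nat) : g (n + 1) 1 = W n := by
  unfold g
  rw [if_pos (by omega)]
  congr 1

theorem pvStep_eq (n : Nat) : pvStep n = (W n, g n 1, g n 2, g n 3, g n 4) := by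
  induction n with
  | zero => simp [pvStep, W, g]
  | succ n ih =>
    have ht : pvStep (n + 1)
        = (W n + g n 1 + g n 2 + g n 3 + g n 4, W n, g n 1, g n 2, g n 3) := by
      rw [pvStep, ih]
    have hW : W (n + 1) = W n + g n 1 + g n 2 + g n 3 + g n 4 := by
      rw [W, ht]
    rw [ht, hW, show g (n+1) 1 = W n from g_one n,
        show g (n+1) 2 = g n 1 from g_succ n 1,
        show g (n+1) 3 = g n 2 from g_succ n 2,
        show g (n+1) 4 = g n 3 from g_succ n 3]

theorem W_succ (n : Nat) :
    W (n + 1) = g (n+1) 1 + g (n+1) 2 + g (n+1) 3 + g (n+1) 4 + g (n+1) 5 := by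
  have ht : pvStep (n + 1)
      = (W n + g n 1 + g n 2 + g n 3 + g n 4, W n, g n 1, g n 2, g n 3) := by
    rw [pvStep, pvStep_eq n]
  rw [show W (n+1) = (pvStep (n+1)).1 from rfl, ht,
      g_one n, show g (n+1) 2 = g n 1 from g_succ n 1,
      show g (n+1) 3 = g n 2 from g_succ n 2,
      show g (n+1) 4 = g n 3 from g_succ n 3,
      show g (n+1) 5 = g n 4 from g_succ n 4]

theorem go_gt (fuel : Nat) (s e : Int) (hs : s > e) (hf : 1 ≤ fuel) :
    countPathGo fuel s e = 0 := by
  match fuel, hf with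
  | f + 1, _ =>
    rw [countPathGo, if_neg (show ¬ s = e by omega), if_pos hs]

theorem go_eq_W : ∀ n : Nat, ∀ fuel : Nat, ∀ s e : Int,
    s ≤ e → (e - s).toNat = n → n < fuel → countPathGo fuel s e = W n := by
  intro n
  induction n using Nat.strong_induction_on with
  | _ n ih =>
    intro fuel s e hse hn hfuel
    match fuel, hfuel with
    | f + 1, hfuel =>
      match n, hn with
      | 0, hn =>
        have hseq : s = e := by omega
        rw [countPathGo, if_pos hseq]
        rfl
      | Nat.succ m, hn =>
        have hne : ¬ s = e := by omega
        have hgt : ¬ s > e := by omega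
        have hterm : ∀ i : Int, 1 ≤ i → i ≤ 5 → countPathGo f (s + i) e = g (m + 1) i.toNat := by
          intro i h1 h5
          by_cases hle : s + i ≤ e
          · have hc : countPathGo f (s + i) e = W (e - (s + i)).toNat :=
              ih (e - (s + i)).toNat (by omega) f _ _ hle rfl (by omega)
            rw [hc]
            rw [g, if_pos (show i.toNat ≤ m + 1 by omega)]
            congr 1
            omega
          · rw [go_gt f (s + i) e (by omega) (by omega),
                g, if_neg (show ¬ i.toNat ≤ m + 1 by omega)]
        rw [countPathGo, if_neg hne, if_neg hgt, W_succ]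
        simp only [List.foldl_cons, List.foldl_nil]
        rw [hterm 1 (by norm_num) (by norm_num), hterm 2 (by norm_num) (by norm_num),
            hterm 3 (by norm_num) (by norm_num), hterm 4 (by norm_num) (by norm_num),
            hterm 5 (by norm_num) (by norm_num)]
        show 0 + g (m+1) 1 + g (m+1) (Int.toNat 2) + g (m+1) (Int.toNat 3) + g (m+1) (Int.toNat 4) + g (m+1) (Int.toNat 5) = _
        rw [show Int.toNat 2 = 2 from rfl, show Int.toNat 3 = 3 from rfl,
            show Int.toNat 4 = 4 from rfl, show Int.toNat 5 = 5 from rfl]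
        ring

-- ===== VERDICT (by name: the statement is the Claim_ definition above) =====
theorem countPath_spec : Claim_equal_countPath := by
  intro s e _ _
  unfold Spec_countPath countPath_alt countPath
  by_cases h : s > e
  · rw [if_pos h, go_gt _ _ _ h (by omega)]
  · rw [if_neg h]
    exact go_eq_W (e - s).toNat _ s e (by omega) rfl (by omega)
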